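-- pv_equiv track=rewrite | github.com/Saurabhkumar726/Coding-Practice | GFG/2026-01-23_Maximum_People _Visible.py | maxPeople
-- ===== SOURCE A (Python) =====
-- def maxPeople(arr):
--     n = len(arr)
--     left_block = [-1] * n
--     right_block = [n] * n
--     stack = []
--
--     for i in range(n):
--         while stack and arr[stack[-1]] < arr[i]:
--             stack.pop()
--         left_block[i] = stack[-1] if stack else -1
--         stack.append(i)
--
--     stack.clear()
--
--     for i in range(n - 1, -1, -1):
--         while stack and arr[stack[-1]] < arr[i]:
--             stack.pop()
--         right_block[i] = stack[-1] if stack else n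
--         stack.append(i)
--
--     ans = 0
--     for i in range(n):
--         seen = (i - left_block[i] - 1) + (right_block[i] - i - 1) + 1
--         ans = max(ans, seen)
--
--     return ans
-- ===== SOURCE B (Python) =====
-- def maxPeople(arr):
--     n = len(arr)
--     best = 0
--     for i in range(n):
--         x = arr[i]
--         l = 0
--         j = i - 1
--         while j >= 0 and arr[j] < x:
--             l += 1
--             j -= 1
--         r = 0
--         j = i + 1
--         while j < n and arr[j] < x:
--             r += 1
--             j += 1
--         best = max(best, l + r + 1)
--     return best
-- ===== Notes on version B (the rewrite author's own statement) =====
-- stated objective: simpler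
-- what changed: Replaces the two monotonic-stack passes and the left/right boundary-index tables with a direct per-index outward expansion: for each i, scan left and right while the neighbor is strictly smaller and count the steps; no stack or auxiliary arrays.
import Mathlib
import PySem

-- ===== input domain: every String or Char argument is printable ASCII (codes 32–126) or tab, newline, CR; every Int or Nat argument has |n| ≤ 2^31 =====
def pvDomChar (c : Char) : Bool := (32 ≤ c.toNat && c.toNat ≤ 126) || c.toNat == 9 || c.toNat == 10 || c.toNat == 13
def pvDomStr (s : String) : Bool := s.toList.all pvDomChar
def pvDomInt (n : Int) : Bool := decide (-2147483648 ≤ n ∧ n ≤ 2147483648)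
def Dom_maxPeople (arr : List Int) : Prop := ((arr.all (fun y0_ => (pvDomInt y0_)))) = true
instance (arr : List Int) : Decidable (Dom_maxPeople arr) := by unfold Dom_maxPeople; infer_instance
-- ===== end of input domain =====

-- B replaces A's two monotonic-stack passes and boundary tables by a direct per-index
-- outward scan (count strictly-smaller neighbors left and right); simpler, not faster.

-- ===== PORT A =====
-- stack rendered with top at the head; left_block built by appending in index order,
-- right_block (filled for descending i) by prepending, so both end up in index order.
def maxPeople (arr : List Int) : Int :=
  let n := arr.length
  let lpass :=
    (List.range n).foldl
      (fun (st : List Int × List Nat) (i : Nat) =>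
        let stack' := st.2.dropWhile (fun s => decide (arr.getD s 0 < arr.getD i 0))
        (st.1 ++ [match stack' with | [] => (-1 : Int) | s :: _ => (s : Int)], i :: stack'))
      ([], [])
  let lb := lpass.1
  let rpass :=
    ((List.range n).reverse).foldl
      (fun (st : List Int × List Nat) (i : Nat) =>
        let stack' := st.2.dropWhile (fun s => decide (arr.getD s 0 < arr.getD i 0))
        ((match stack' with | [] => (n : Int) | s :: _ => (s : Int)) :: st.1, i :: stack'))
      ([], [])
  let rb := rpass.1
  (List.range n).foldl
    (fun (ans : Int) (i : Nat) =>
      max ans (((i : Int) - lb.getD i 0 - 1) + (rb.getD i 0 - (i : Int) - 1) + 1)) 0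

-- ===== PORT B =====
-- while j >= 0 and arr[j] < x: count, j -= 1   (parameter is j+1, i.e. starts at i)
def pvLcnt (arr : List Int) (x : Int) : Nat → Nat
  | 0 => 0
  | j + 1 => if arr.getD j 0 < x then pvLcnt arr x j + 1 else 0

-- while j < n and arr[j] < x: count, j += 1
def pvRcnt (arr : List Int) (x : Int) (j : Nat) : Nat :=
  if j < arr.length then
    if arr.getD j 0 < x then pvRcnt arr x (j + 1) + 1 else 0
  else 0
termination_by arr.length - j
decreasing_by omega

def maxPeople_alt (arr : List Int) : Int :=
  (List.range arr.length).foldl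
    (fun best i =>
      let x := arr.getD i 0
      max best ((pvLcnt arr x i : Int) + (pvRcnt arr x (i + 1) : Int) + 1)) 0

-- ===== PRECONDITION & SPEC =====
def Spec_maxPeople (arr : List Int) (out : Int) : Prop := out = maxPeople_alt arr
instance (arr : List Int) (out : Int) : Decidable (Spec_maxPeople arr out) := by unfold Spec_maxPeople; infer_instance

-- ===== CLAIM (what is proved, stated in full; the proofs are below) =====
def Claim_equal_maxPeople : Prop := ∀ (arr : List Int), Dom_maxPeople arr → Spec_maxPeople arr (maxPeople arr)

-- ===== LEMMAS AND PROOFS =====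

-- Spec-level machinery, generic in the access function f : Nat → Int.

-- stack contents (top first) after processing indices 0..i-1 of A's left pass
def pvStk (f : Nat → Int) : Nat → List Nat
  | 0 => []
  | i + 1 => i :: (pvStk f i).dropWhile (fun s => decide (f s < f i))

-- value A stores in left_block[i]
def pvLb (f : Nat → Int) (i : Nat) : Int :=
  match (pvStk f i).dropWhile (fun s => decide (f s < f i)) with
  | [] => -1
  | s :: _ => (s : Int)

-- generic left count (B's leftward while loop)
def pvLc (f : Nat → Int) (x : Int) : Nat → Nat
  | 0 => 0
  | j + 1 => if f j < x then pvLc f x j + 1 else 0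

def pvQ (f : Nat → Int) (i j : Nat) : Bool := decide (∀ k, k < i → j < k → f k ≤ f j)

theorem pvStk_lt (f : Nat → Int) (i : Nat) : ∀ s ∈ pvStk f i, s < i := by
  induction i with
  | zero => simp [pvStk]
  | succ i ih =>
    intro s hs
    simp only [pvStk, List.mem_cons] at hs
    rcases hs with h | h
    · omega
    · have := ih s ((List.dropWhile_sublist _).mem h); omega

theorem pvDropWhile_eq_filter {α : Type} (p : α → Bool) (l : List α)
    (h : l.Pairwise (fun a b => p a = false → p b = false)) :
    l.dropWhile p = l.filter (fun a => !p a) := by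
  induction l with
  | nil => rfl
  | cons a t ih =>
    rcases List.pairwise_cons.1 h with ⟨ha, ht⟩
    by_cases hp : p a = true
    · simp [hp, ih ht]
    · have hp' : p a = false := by simpa using hp
      have : ∀ b ∈ t, p b = false := fun b hb => ha b hb hp'
      rw [List.dropWhile_cons_of_neg (by simp [hp']), List.filter_cons_of_pos (by simp [hp']),
        List.filter_eq_self.2 (by intro b hb; simp [this b hb])]

theorem pvRevRange_pairwise (i : Nat) : ((List.range i).reverse).Pairwise (· > ·) := by
  rw [List.pairwise_reverse]
  exact List.pairwise_lt_range

theorem pvQ_succ (f : Nat → Int) (i j : Nat) (hj : j < i) :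
    pvQ f (i + 1) j = (pvQ f i j && !decide (f j < f i)) := by
  have hiff : (∀ k, k < i + 1 → j < k → f k ≤ f j)
      ↔ ((∀ k, k < i → j < k → f k ≤ f j) ∧ f i ≤ f j) := by
    constructor
    · intro h
      exact ⟨fun k hk hjk => h k (by omega) hjk, h i (by omega) hj⟩
    · rintro ⟨h1, h2⟩ k hk hjk
      by_cases hki : k = i
      · subst hki; exact h2
      · exact h1 k (by omega) hjk
  simp only [pvQ, ← decide_not, ← Bool.decide_and, not_lt, decide_eq_decide]
  exact hiff

theorem pvDrop_aux (f : Nat → Int) (i : Nat)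
    (hstk : pvStk f i = ((List.range i).reverse).filter (pvQ f i)) :
    (pvStk f i).dropWhile (fun s => decide (f s < f i))
      = ((List.range i).reverse).filter (pvQ f (i + 1)) := by
  rw [hstk]
  have hmem : ∀ a ∈ ((List.range i).reverse).filter (pvQ f i), a < i := by
    intro a ha
    have := List.mem_filter.1 ha
    have := List.mem_reverse.1 this.1
    exact List.mem_range.1 this
  have hq : ∀ a ∈ ((List.range i).reverse).filter (pvQ f i), pvQ f i a = true := by
    intro a ha; exact (List.mem_filter.1 ha).2
  have hpw : (((List.range i).reverse).filter (pvQ f i)).Pairwise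
      (fun a b => decide (f a < f i) = false → decide (f b < f i) = false) := by
    have h1 : (((List.range i).reverse).filter (pvQ f i)).Pairwise (· > ·) :=
      (pvRevRange_pairwise i).filter _
    refine List.Pairwise.imp_of_mem ?_ h1
    intro a b ha hb hab hpa
    have hqb := hq b hb
    have hai := hmem a ha
    simp only [pvQ, decide_eq_true_eq] at hqb
    have hba : f a ≤ f b := hqb a hai hab
    simp only [decide_eq_false_iff_not, not_lt] at hpa ⊢
    exact le_trans hpa hba
  rw [pvDropWhile_eq_filter _ _ hpw, List.filter_filter]
  apply List.filter_congr
  intro j hj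
  have hji : j < i := List.mem_range.1 (List.mem_reverse.1 hj)
  rw [pvQ_succ f i j hji, Bool.and_comm]

theorem pvStk_eq (f : Nat → Int) (i : Nat) :
    pvStk f i = ((List.range i).reverse).filter (pvQ f i) := by
  induction i with
  | zero => rfl
  | succ i ih =>
    have hrev : (List.range (i + 1)).reverse = i :: (List.range i).reverse := by
      simp [List.range_succ]
    rw [pvStk, pvDrop_aux f i ih, hrev, List.filter_cons_of_pos]
    simp only [pvQ, decide_eq_true_eq]
    intro k hk hik; omega

theorem pvDrop_eq (f : Nat → Int) (i : Nat) :
    (pvStk f i).dropWhile (fun s => decide (f s < f i))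
      = ((List.range i).reverse).filter (pvQ f (i + 1)) :=
  pvDrop_aux f i (pvStk_eq f i)

-- the maximal index below i failing the strictly-smaller test, if any (else none)
theorem pvHead_filter (q : Nat → Bool) (i m : Nat) (hm : m < i) (hq : q m = true)
    (habove : ∀ k, m < k → k < i → q k = false) :
    ((List.range i).reverse).filter q = m :: ((List.range m).reverse).filter q := by
  induction i with
  | zero => omega
  | succ i ih =>
    have hrev : (List.range (i + 1)).reverse = i :: (List.range i).reverse := by
      simp [List.range_succ]
    rw [hrev]
    by_cases hmi : m = i
    · subst hmi; rw [List.filter_cons_of_pos hq]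
    · rw [List.filter_cons_of_neg (by simp [habove i (by omega) (by omega)])]
      exact ih (by omega) (fun k h1 h2 => habove k h1 (by omega))

theorem pvFilter_nil (q : Nat → Bool) (i : Nat) (h : ∀ k, k < i → q k = false) :
    ((List.range i).reverse).filter q = [] := by
  rw [List.filter_eq_nil_iff]
  intro a ha
  simp [h a (List.mem_range.1 (List.mem_reverse.1 ha))]

theorem pvExistsMax (q : Nat → Prop) [DecidablePred q] (i : Nat) (h : ∃ j, j < i ∧ q j) :
    ∃ m, m < i ∧ q m ∧ ∀ k, m < k → k < i → ¬ q k := by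
  induction i with
  | zero => omega
  | succ i ih =>
    by_cases hqi : q i
    · exact ⟨i, by omega, hqi, by omega⟩
    · obtain ⟨j, hj, hqj⟩ := h
      have hji : j < i := by
        rcases Nat.lt_succ_iff_lt_or_eq.1 hj with h | h
        · exact h
        · subst h; exact absurd hqj hqi
      obtain ⟨m, h1, h2, h3⟩ := ih ⟨j, hji, hqj⟩
      refine ⟨m, by omega, h2, fun k hk1 hk2 => ?_⟩
      by_cases hki : k = i
      · subst hki; exact hqi
      · exact h3 k hk1 (by omega)

theorem pvLc_all (f : Nat → Int) (x : Int) (i : Nat) (h : ∀ j, j < i → f j < x) :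
    pvLc f x i = i := by
  induction i with
  | zero => rfl
  | succ i ih => simp [pvLc, h i (by omega), ih (fun j hj => h j (by omega))]

theorem pvLc_stop (f : Nat → Int) (x : Int) (m : Nat) (hm : ¬ f m < x) :
    ∀ i, m < i → (∀ k, m < k → k < i → f k < x) → pvLc f x i = i - 1 - m := by
  intro i
  induction i with
  | zero => omega
  | succ i ih =>
    intro hmi hk
    by_cases h : m = i
    · subst h; simp [pvLc, hm]
    · have : f i < x := hk i (by omega) (by omega)
      have := ih (by omega) (fun k h1 h2 => hk k h1 (by omega))
      simp only [pvLc, this, if_pos ‹f i < x›]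
      omega

-- the crux: A's left-boundary value and B's left count are two sides of one formula
theorem pvLb_lc (f : Nat → Int) (i : Nat) :
    (i : Int) - pvLb f i - 1 = (pvLc f (f i) i : Int) := by
  unfold pvLb
  rw [pvDrop_eq]
  by_cases hex : ∃ j, j < i ∧ ¬ f j < f i
  · obtain ⟨m, hm, hqm, habove⟩ := pvExistsMax (fun j => ¬ f j < f i) i hex
    have hsmall : ∀ k, m < k → k < i → f k < f i := by
      intro k h1 h2
      by_contra hc
      exact habove k h1 h2 hc
    have hq : pvQ f (i + 1) m = true := by
      simp only [pvQ, decide_eq_true_eq]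
      intro k hk hmk
      by_cases hki : k = i
      · rw [hki]; omega
      · have := hsmall k hmk (by omega); omega
    have habove' : ∀ k, m < k → k < i → pvQ f (i + 1) k = false := by
      intro k h1 h2
      simp only [pvQ, decide_eq_false_iff_not]
      intro hall
      have h3 := hall i (by omega) (by omega)
      have h4 := hsmall k h1 h2
      omega
    rw [pvHead_filter (pvQ f (i + 1)) i m hm hq habove']
    show (i : Int) - (m : Int) - 1 = (pvLc f (f i) i : Int)
    rw [pvLc_stop f (f i) m hqm i hm hsmall]
    omega
  · have hall : ∀ j, j < i → f j < f i := by
      intro j hj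
      by_contra hc
      exact hex ⟨j, hj, hc⟩
    rw [pvFilter_nil (pvQ f (i + 1)) i (fun k hk => by
      simp only [pvQ, decide_eq_false_iff_not]
      intro hq
      have h3 := hq i (by omega) (by omega)
      have h4 := hall k hk
      omega)]
    show (i : Int) - (-1) - 1 = (pvLc f (f i) i : Int)
    rw [pvLc_all f (f i) i hall]
    omega

-- index-reversal function for the right pass
theorem pvRevRange_eq_map (n : Nat) :
    (List.range n).reverse = (List.range n).map (fun m => n - 1 - m) := by
  apply List.ext_getElem (by simp)
  intro i h1 h2
  simp only [List.length_reverse, List.length_range] at h1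
  simp [List.getElem_reverse]

-- A's left pass state after m steps
theorem pvLpass (arr : List Int) (m : Nat) :
    (List.range m).foldl
      (fun (st : List Int × List Nat) (i : Nat) =>
        let stack' := st.2.dropWhile (fun s => decide (arr.getD s 0 < arr.getD i 0))
        (st.1 ++ [match stack' with | [] => (-1 : Int) | s :: _ => (s : Int)], i :: stack'))
      ([], [])
    = ((List.range m).map (pvLb (fun j => arr.getD j 0)), pvStk (fun j => arr.getD j 0) m) := by
  induction m with
  | zero => rfl
  | succ m ih =>
    rw [List.range_succ, List.foldl_append, ih]
    simp only [List.foldl_cons, List.foldl_nil, List.map_append, List.map_cons, List.map_nil]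
    constructor <;> rfl

-- A's right pass relates to the left pass of the index-reversed access
theorem pvRpass_key (arr : List Int) (n : Nat) : ∀ m, m ≤ n →
    (List.range m).foldl
      (fun (st : List Int × List Nat) (j : Nat) =>
        let i := n - 1 - j
        let stack' := st.2.dropWhile (fun s => decide (arr.getD s 0 < arr.getD i 0))
        ((match stack' with | [] => (n : Int) | s :: _ => (s : Int)) :: st.1, i :: stack'))
      ([], [])
    = (((List.range m).reverse).map
        (fun t => (n : Int) - 1 - pvLb (fun u => arr.getD (n - 1 - u) 0) t),
       (pvStk (fun u => arr.getD (n - 1 - u) 0) m).map (fun t => n - 1 - t)) := by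
  intro m
  induction m with
  | zero => intro _; rfl
  | succ m ih =>
    intro hm
    rw [List.range_succ, List.foldl_append, ih (by omega), List.foldl_cons, List.foldl_nil]
    have hdwmap :
        ((pvStk (fun u => arr.getD (n - 1 - u) 0) m).map (fun t => n - 1 - t)).dropWhile
            (fun s => decide (arr.getD s 0 < arr.getD (n - 1 - m) 0))
          = ((pvStk (fun u => arr.getD (n - 1 - u) 0) m).dropWhile
              (fun t => decide (arr.getD (n - 1 - t) 0 < arr.getD (n - 1 - m) 0))).map
              (fun t => n - 1 - t) := by
      rw [List.dropWhile_map]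
      rfl
    simp only [hdwmap]
    have hrev : (List.range m ++ [m]).reverse = m :: (List.range m).reverse := by
      simp
    rw [hrev, Prod.mk.injEq]
    constructor
    · -- the stored value
      simp only [List.map_cons]
      congr 1
      cases hdw : (pvStk (fun u => arr.getD (n - 1 - u) 0) m).dropWhile
          (fun t => decide (arr.getD (n - 1 - t) 0 < arr.getD (n - 1 - m) 0)) with
      | nil =>
        simp only [pvLb, hdw, List.map_nil]
        omega
      | cons s tl =>
        have hs : s < m := by
          apply pvStk_lt (fun u => arr.getD (n - 1 - u) 0) m
          exact (List.dropWhile_sublist _).mem (hdw ▸ List.mem_cons_self)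
        simp only [List.map_cons]
        show ((n - 1 - s : Nat) : Int)
            = (n : Int) - 1 - pvLb (fun u => arr.getD (n - 1 - u) 0) m
        unfold pvLb
        rw [hdw]
        push_cast [Nat.cast_sub]
        omega
    · -- the stack
      show (n - 1 - m) :: _ = _
      rw [pvStk]
      simp only [List.map_cons]

theorem pvRcnt_eq (arr : List Int) (x : Int) (m j : Nat) (h : j + m = arr.length) :
    pvRcnt arr x j = pvLc (fun t => arr.getD (arr.length - 1 - t) 0) x m := by
  induction m generalizing j with
  | zero => rw [pvRcnt]; simp [pvLc]; omega
  | succ m ih =>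
    rw [pvRcnt]
    have hj : j < arr.length := by omega
    have hidx : arr.length - 1 - m = j := by omega
    simp only [if_pos hj, pvLc, hidx]
    by_cases hlt : arr[j]?.getD 0 < x
    · simp [hlt, ih (j + 1) (by omega)]
    · simp [hlt]

theorem pvLcnt_eq (arr : List Int) (x : Int) (i : Nat) :
    pvLcnt arr x i = pvLc (fun j => arr.getD j 0) x i := by
  induction i with
  | zero => rfl
  | succ i ih => simp [pvLcnt, pvLc, ih]

theorem pvGetD_map_range {α : Type} [Inhabited α] (h : Nat → α) (n i : Nat) (hi : i < n) (d : α) :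
    ((List.range n).map h).getD i d = h i := by
  rw [List.getD_eq_getElem?_getD, List.getElem?_map, List.getElem?_range hi]
  rfl

-- ===== VERDICT (by name: the statement is the Claim_ definition above) =====
theorem maxPeople_spec : Claim_equal_maxPeople := by
  intro arr _
  unfold Spec_maxPeople maxPeople maxPeople_alt
  dsimp only
  rw [pvRevRange_eq_map arr.length, List.foldl_map, pvLpass arr arr.length,
    pvRpass_key arr arr.length arr.length (le_refl _),
    pvRevRange_eq_map arr.length, List.map_map]
  apply List.foldl_ext
  intro a i hi
  have hi' : i < arr.length := List.mem_range.1 hi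
  rw [pvGetD_map_range _ _ _ hi', pvGetD_map_range _ _ _ hi']
  simp only [Function.comp]
  congr 1
  have hL : (i : Int) - pvLb (fun j => arr.getD j 0) i - 1
      = (pvLcnt arr (arr.getD i 0) i : Int) := by
    rw [pvLcnt_eq]; exact pvLb_lc (fun j => arr.getD j 0) i
  have hgi : arr.getD (arr.length - 1 - (arr.length - 1 - i)) 0 = arr.getD i 0 := by
    congr 1; omega
  have hR : ((arr.length : Int) - 1 - pvLb (fun t => arr.getD (arr.length - 1 - t) 0)
        (arr.length - 1 - i)) - (i : Int) - 1
      = (pvRcnt arr (arr.getD i 0) (i + 1) : Int) := by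
    rw [pvRcnt_eq arr _ (arr.length - 1 - i) (i + 1) (by omega)]
    have h2 := pvLb_lc (fun t => arr.getD (arr.length - 1 - t) 0) (arr.length - 1 - i)
    simp only [hgi] at h2
    omega
  rw [← hL, ← hR]
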